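-- pv_equiv track=rewrite | github.com/tainaslima/special-topics-in-programming | works/Semana 1/156_Ananagrams_TainaLima.py | findAnanagrams
-- ===== SOURCE A (Python) =====
-- def findAnanagrams(domainDict):
--     ananagrams = domainDict.copy()
--
--     for x in range(len(domainDict)):
--         base = []
--         base[:] = domainDict[x].lower()
--         base.sort()
--
--         for y in range(x+1, len(domainDict)):
--             compared_word = []
--             compared_word[:] = domainDict[y].lower()
--             compared_word.sort()
--
--             if (base == compared_word):
--                 if (domainDict[x] in ananagrams):
--                     ananagrams.remove(domainDict[x])
--                 if (domainDict[y] in ananagrams):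
--                     ananagrams.remove(domainDict[y])
--                 break
--
--     ananagrams.sort()
--     return ananagrams
-- ===== SOURCE B (Python) =====
-- def findAnanagrams(domainDict):
--     counts = {}
--     for w in domainDict:
--         s = tuple(sorted(w.lower()))
--         counts[s] = counts.get(s, 0) + 1
--     return sorted(w for w in domainDict if counts[tuple(sorted(w.lower()))] == 1)
-- ===== Notes on version B (the rewrite author's own statement) =====
-- stated objective: faster
-- what changed: Replaces the quadratic pairwise scan with conditional list.remove calls by a single pass that counts sorted-letter signatures in a dict and keeps the words whose signature occurs exactly once.
import Mathlib
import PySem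

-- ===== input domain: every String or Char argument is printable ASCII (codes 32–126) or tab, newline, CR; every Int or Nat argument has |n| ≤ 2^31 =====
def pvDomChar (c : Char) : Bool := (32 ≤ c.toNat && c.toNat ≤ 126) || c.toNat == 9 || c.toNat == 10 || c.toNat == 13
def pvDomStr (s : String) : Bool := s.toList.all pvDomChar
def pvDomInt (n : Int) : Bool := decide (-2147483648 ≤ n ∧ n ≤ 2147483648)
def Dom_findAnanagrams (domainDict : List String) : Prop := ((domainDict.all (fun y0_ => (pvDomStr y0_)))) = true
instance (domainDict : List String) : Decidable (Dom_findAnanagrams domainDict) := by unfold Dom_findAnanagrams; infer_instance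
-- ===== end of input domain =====

-- B replaces A's quadratic pairwise scan-and-remove by a one-pass signature counter (measured asymptotically faster); return values proved equal.


-- ===== PORT A =====
-- inner 'for y in range(x+1, len)' loop: computes compared_word, on the first match does the
-- two conditional removes and breaks (returns); otherwise continues with the rest of the ys.
def findAnanagramsInner (d : List String) (x : Int) (base : List Char) (ys : List Int) (anan : List String) : List String :=
  match ys with
  | [] => anan
  | y :: rest =>
    let comparedWord := PySem.List.sorted (PySem.Str.lower (PySem.List.pyGetD d y "")).toList (fun c => c) false
    if comparedWord = base then
      let a1 := if PySem.List.pyGetD d x "" ∈ anan then anan.erase (PySem.List.pyGetD d x "") else anan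
      if PySem.List.pyGetD d y "" ∈ a1 then a1.erase (PySem.List.pyGetD d y "") else a1
    else
      findAnanagramsInner d x base rest anan

-- indices x, y are always in range, so pyGetD with default "" is exact
def findAnanagrams (domainDict : List String) : List String :=
  let ananagrams := (PySem.List.pyRange 0 (PySem.List.len domainDict)).foldl
    (fun anan x =>
      let base := PySem.List.sorted (PySem.Str.lower (PySem.List.pyGetD domainDict x "")).toList (fun c => c) false
      findAnanagramsInner domainDict x base (PySem.List.pyRange (x + 1) (PySem.List.len domainDict)) anan)
    domainDict
  PySem.List.sorted ananagrams (fun w => w) false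

-- ===== PORT B =====
-- counts[tuple(sorted(w.lower()))] : the key is the sorted char list; counts[...] is looked up
-- with default 0, exact here because every looked-up key was inserted by the counting pass.
def findAnanagrams_alt (domainDict : List String) : List String :=
  let counts := domainDict.foldl
    (fun c w =>
      let s := PySem.List.sorted (PySem.Str.lower w).toList (fun ch => ch) false
      c.insert s (c.getD s 0 + 1))
    (PySem.Dict.empty : PySem.Dict (List Char) Int)
  PySem.List.sorted
    (domainDict.filter (fun w =>
      counts.getD (PySem.List.sorted (PySem.Str.lower w).toList (fun ch => ch) false) 0 == 1))
    (fun w => w) false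

-- ===== PRECONDITION & SPEC =====
def Spec_findAnanagrams (domainDict : List String) (out : List String) : Prop := out = findAnanagrams_alt domainDict
instance (domainDict : List String) (out : List String) : Decidable (Spec_findAnanagrams domainDict out) := by unfold Spec_findAnanagrams; infer_instance

-- ===== CLAIM (what is proved, stated in full; the proofs are below) =====
def Claim_equal_findAnanagrams : Prop := ∀ (domainDict : List String), Dom_findAnanagrams domainDict → Spec_findAnanagrams domainDict (findAnanagrams domainDict)

-- ===== LEMMAS AND PROOFS =====

-- the anagram signature both programs compute
def pvSig (w : String) : List Char := PySem.List.sorted (PySem.Str.lower w).toList (fun c => c) false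
-- signature of the word at index k
def pvSg (d : List String) (k : Nat) : List Char := pvSig (d.getD k "")
-- words whose signature occurs exactly once
def pvGood (d : List String) (w : String) : Bool := (d.map pvSig).count (pvSig w) == 1
-- Python's 'if v in l: l.remove(v)'
def pvRip (v : String) (l : List String) : List String := if v ∈ l then l.erase v else l
-- the index list a..a+m-1
def pvCand (a m : Nat) : List Nat := match m with | 0 => [] | Nat.succ m => a :: pvCand (a+1) m
-- first y > k with the same signature
def pvFm (d : List String) (k : Nat) : Option Nat :=
  (pvCand (k+1) (d.length - (k+1))).find? (fun j => pvSg d j == pvSg d k)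
-- occurrence indicator of w at index k
def pvE (d : List String) (w : String) (k : Nat) : Nat := if d.getD k "" = w then 1 else 0
-- number of removal attempts targeting value w made while processing index k
def pvAtt (d : List String) (w : String) (k : Nat) : Nat :=
  match pvFm d k with | none => 0 | some j => pvE d w k + pvE d w j
-- what one outer iteration does to the ananagrams list
def pvStep (d : List String) (anan : List String) (k : Nat) : List String :=
  match pvFm d k with | none => anan | some j => pvRip (d.getD j "") (pvRip (d.getD k "") anan)

lemma pvCand_mem {a m x : Nat} : x ∈ pvCand a m ↔ a ≤ x ∧ x < a + m := by
  induction m generalizing a with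
  | zero => simp [pvCand]
  | succ m ih => simp [pvCand, ih]; omega

lemma pvCand_find?_none {p : Nat → Bool} {a m : Nat} :
    (pvCand a m).find? p = none ↔ ∀ j, a ≤ j → j < a + m → p j = false := by
  rw [List.find?_eq_none]
  constructor
  · intro h j h1 h2; have := h j (pvCand_mem.mpr ⟨h1, h2⟩); simpa using this
  · intro h x hx; have := pvCand_mem.mp hx; simp [h x this.1 this.2]

lemma pvCand_find?_some {p : Nat → Bool} {a m j : Nat} (h : (pvCand a m).find? p = some j) :
    p j = true ∧ a ≤ j ∧ j < a + m ∧ ∀ i, a ≤ i → i < j → p i = false := by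
  induction m generalizing a with
  | zero => simp [pvCand] at h
  | succ m ih =>
    simp only [pvCand, List.find?_cons] at h
    by_cases hp : p a
    · simp [hp] at h; subst h; exact ⟨hp, le_refl _, by omega, by intro i h1 h2; omega⟩
    · simp [hp] at h
      obtain ⟨h1, h2, h3, h4⟩ := ih h
      refine ⟨h1, by omega, by omega, ?_⟩
      intro i hi1 hi2
      rcases Nat.eq_or_lt_of_le hi1 with rfl | hl
      · simpa using hp
      · exact h4 i hl hi2

lemma pvCand_find?_intro {p : Nat → Bool} {a m j : Nat} (h1 : a ≤ j) (h2 : j < a + m)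
    (h3 : p j = true) (h4 : ∀ i, a ≤ i → i < j → p i = false) :
    (pvCand a m).find? p = some j := by
  induction m generalizing a with
  | zero => omega
  | succ m ih =>
    simp only [pvCand, List.find?_cons]
    rcases Nat.eq_or_lt_of_le h1 with rfl | hl
    · simp [h3]
    · have hpa : p a = false := h4 a (le_refl _) hl
      simp [hpa]
      exact ih hl (by omega) (fun i hi1 hi2 => h4 i (by omega) hi2)

-- pvCand shifts by map (+1)
lemma pvCand_succ (a m : Nat) : pvCand (a+1) m = (pvCand a m).map (· + 1) := by
  induction m generalizing a with
  | zero => simp [pvCand]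
  | succ m ih => simp [pvCand, ih]

-- range(a, b) is the candidate list, cast to Int
lemma pvPyRange_cast (a b : Nat) :
    PySem.List.pyRange (a : Int) (b : Int) = (pvCand a (b - a)).map (Nat.cast : Nat → Int) := by
  have h : ∀ m a, b - a = m → PySem.List.pyRange (a : Int) (b : Int) = (pvCand a m).map (Nat.cast : Nat → Int) := by
    intro m
    induction m with
    | zero =>
      intro a ha
      have hlt : ¬ (a:Int) < b := by omega
      simp [PySem.List.pyRange, hlt, pvCand]
    | succ m ih =>
      intro a ha
      have hab : (a:Int) < b := by omega
      rw [PySem.List.pyRange_one_cons hab]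
      have hc : ((a:Int) + 1) = ((a+1 : Nat) : Int) := by push_cast; ring
      rw [hc, ih (a+1) (by omega)]
      simp [pvCand]
  exact h (b - a) a rfl

-- the inner loop, characterised by find?
lemma pvInner_eq (d : List String) (x : Int) (base : List Char) (ys : List Int) (anan : List String) :
    findAnanagramsInner d x base ys anan =
      match ys.find? (fun y =>
          PySem.List.sorted (PySem.Str.lower (PySem.List.pyGetD d y "")).toList (fun c => c) false == base) with
      | none => anan
      | some y => pvRip (PySem.List.pyGetD d y "") (pvRip (PySem.List.pyGetD d x "") anan) := by
  induction ys with
  | nil => rfl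
  | cons y rest ih =>
    rw [List.find?_cons]
    cases hcw : (PySem.List.sorted (PySem.Str.lower (PySem.List.pyGetD d y "")).toList (fun c => c) false == base) with
    | true =>
      simp only [findAnanagramsInner, if_pos (eq_of_beq hcw)]
      rfl
    | false =>
      have h : ¬ (PySem.List.sorted (PySem.Str.lower (PySem.List.pyGetD d y "")).toList (fun c => c) false = base) := by
        intro e; rw [e] at hcw; simp at hcw
      simp only [findAnanagramsInner, if_neg h]
      exact ih

-- the outer loop, as a fold of pvStep over Nat indices
lemma pvA_eq_fold (d : List String) :
    findAnanagrams d = PySem.List.sorted ((pvCand 0 d.length).foldl (pvStep d) d) (fun w => w) false := by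
  unfold findAnanagrams
  rw [show PySem.List.len d = (d.length : Int) from PySem.List.len_eq d]
  rw [show ((0:Int)) = ((0:Nat):Int) from rfl, pvPyRange_cast 0 d.length, Nat.sub_zero]
  rw [List.foldl_map]
  refine congrArg (fun l => PySem.List.sorted l (fun w => w) false) ?_
  apply PySem.List.foldl_congr_mem
  intro anan k _
  rw [pvInner_eq]
  have hc : ((k:Int) + 1) = ((k+1 : Nat) : Int) := by push_cast; ring
  rw [hc, pvPyRange_cast (k+1) d.length, List.find?_map]
  have hp : ((fun y => PySem.List.sorted (PySem.Str.lower (PySem.List.pyGetD d y "")).toList (fun c => c) false ==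
        PySem.List.sorted (PySem.Str.lower (PySem.List.pyGetD d (k:Int) "")).toList (fun c => c) false) ∘ (Nat.cast : Nat → Int))
      = (fun j => pvSg d j == pvSg d k) := by
    funext j
    simp [Function.comp, pvSg, pvSig, PySem.List.pyGetD_natCast]
  rw [hp]
  unfold pvStep pvFm
  cases hf : (pvCand (k+1) (d.length - (k+1))).find? (fun j => pvSg d j == pvSg d k) with
  | none => rfl
  | some j => simp [PySem.List.pyGetD_natCast]

-- counting elements of the state
lemma pvRip_count (v w : String) (l : List String) :
    (pvRip v l).count w = l.count w - (if v = w then 1 else 0) := by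
  unfold pvRip
  by_cases h1 : v ∈ l
  · simp only [h1, if_true]
    by_cases h2 : v = w
    · subst h2; rw [List.count_erase_self]; simp
    · rw [List.count_erase_of_ne (fun e => h2 e.symm)]; simp [h2]
  · simp only [h1, if_false]
    by_cases h2 : v = w
    · subst h2; simp [List.count_eq_zero_of_not_mem h1]
    · simp [h2]

lemma pvFold_count (d : List String) (w : String) (ks : List Nat) (anan : List String) :
    (ks.foldl (pvStep d) anan).count w = anan.count w - (ks.map (pvAtt d w)).sum := by
  induction ks generalizing anan with
  | nil => simp
  | cons k t ih =>
    have hstep : (pvStep d anan k).count w = anan.count w - pvAtt d w k := by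
      unfold pvStep pvAtt
      cases pvFm d k with
      | none => simp
      | some j => simp only [pvRip_count]; unfold pvE; omega
    rw [List.foldl_cons, ih, hstep]
    simp only [List.map_cons, List.sum_cons]
    omega


lemma pvSum_map_add {α : Type} (l : List α) (f g : α → Nat) :
    (l.map (fun x => f x + g x)).sum = (l.map f).sum + (l.map g).sum := by
  induction l with
  | nil => rfl
  | cons x t ih => simp [ih]; omega


lemma pvSum_indicator (k0 a m : Nat) :
    ((pvCand a m).map (fun k => if k = k0 then 1 else 0)).sum
      = if a ≤ k0 ∧ k0 < a + m then 1 else 0 := by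
  induction m generalizing a with
  | zero => simp [pvCand]
  | succ m ih =>
    simp only [pvCand, List.map_cons, List.sum_cons, ih]
    split_ifs <;> omega


lemma pvCount_eq_sum {α : Type} [BEq α] [LawfulBEq α] (l : List α) (v dflt : α) :
    l.count v = ((pvCand 0 l.length).map (fun k => if l.getD k dflt == v then 1 else 0)).sum := by
  induction l with
  | nil => rfl
  | cons x t ih =>
    simp only [List.length_cons, pvCand, List.map_cons, List.sum_cons, List.getD_cons_zero]
    rw [pvCand_succ, List.map_map]
    simp only [Function.comp_def, List.getD_cons_succ]
    rw [← ih]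
    rw [List.count_cons]
    cases h : x == v <;> simp [h, Nat.add_comm]


-- getD through a map
lemma pvGetD_map {α β : Type} (f : α → β) (l : List α) (k : Nat) (dfl : α) :
    (l.map f).getD k (f dfl) = f (l.getD k dfl) := by
  by_cases h : k < l.length
  · rw [List.getD_eq_getElem _ _ (by simpa using h), List.getD_eq_getElem _ _ h, List.getElem_map]
  · rw [List.getD_eq_default _ _ (by simpa using Nat.le_of_not_lt h),
        List.getD_eq_default _ _ (Nat.le_of_not_lt h)]

-- two distinct positions with the same signature force a count of at least 2
lemma pvTwo_le_count (d : List String) (k j : Nat) (hk : k < d.length) (hj : j < d.length)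
    (hne : k ≠ j) (hsg : pvSg d j = pvSg d k) : 2 ≤ (d.map pvSig).count (pvSg d k) := by
  rw [pvCount_eq_sum (d.map pvSig) (pvSg d k) (pvSig "")]
  have hle : ((pvCand 0 (d.map pvSig).length).map
        (fun i => (if i = k then 1 else 0) + (if i = j then 1 else 0))).sum
      ≤ ((pvCand 0 (d.map pvSig).length).map
        (fun i => if (d.map pvSig).getD i (pvSig "") == pvSg d k then 1 else 0)).sum := by
    apply List.sum_le_sum
    intro i _
    have hrw : (d.map pvSig).getD i (pvSig "") = pvSg d i := by rw [pvGetD_map]; rfl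
    rw [hrw]
    by_cases h1 : i = k
    · subst h1; rw [if_pos rfl, if_neg hne]; simp
    · by_cases h2 : i = j
      · subst h2; rw [if_neg h1, if_pos rfl, hsg]; simp
      · rw [if_neg h1, if_neg h2]; simp
  refine le_trans ?_ hle
  rw [pvSum_map_add, pvSum_indicator, pvSum_indicator, List.length_map]
  simp [hk, hj]

-- removing a not-good value does not change the good filter
lemma pvErase_filter (p : String → Bool) (v : String) (l : List String) (h : p v = false) :
    (l.erase v).filter p = l.filter p := by
  induction l with
  | nil => rfl
  | cons x t ih =>
    by_cases hx : x = v
    · subst hx; rw [List.erase_cons_head, List.filter_cons, h]; simp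
    · rw [List.erase_cons_tail (by simpa using fun e => hx e), List.filter_cons,
          List.filter_cons, ih]

-- removing a not-good value does not change the good filter
lemma pvRip_filter (d : List String) (v : String) (l : List String) (h : pvGood d v = false) :
    (pvRip v l).filter (pvGood d) = l.filter (pvGood d) := by
  unfold pvRip
  split
  · exact pvErase_filter _ _ _ h
  · rfl

-- characterisation of a successful first-match search
lemma pvFm_some (d : List String) (k j : Nat) (h : pvFm d k = some j) :
    pvSg d j = pvSg d k ∧ k < j ∧ j < d.length ∧ k < d.length ∧
      ∀ i, k < i → i < j → pvSg d i ≠ pvSg d k := by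
  obtain ⟨h1, h2, h3, h4⟩ := pvCand_find?_some h
  refine ⟨by simpa using h1, by omega, by omega, by omega, ?_⟩
  intro i hi1 hi2 he
  have := h4 i (by omega) hi2
  simp [he] at this

lemma pvFm_none (d : List String) (k : Nat) (h : pvFm d k = none) :
    ∀ j, k < j → j < d.length → pvSg d j ≠ pvSg d k := by
  intro j h1 h2 he
  have := (pvCand_find?_none.mp h) j (by omega) (by omega)
  simp [he] at this

-- one step never touches the good words
lemma pvStep_filter (d : List String) (anan : List String) (k : Nat) :
    (pvStep d anan k).filter (pvGood d) = anan.filter (pvGood d) := by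
  unfold pvStep
  cases hf : pvFm d k with
  | none => rfl
  | some j =>
    obtain ⟨hsg, hkj, hjn, hkn, _⟩ := pvFm_some d k j hf
    have h2 : 2 ≤ (d.map pvSig).count (pvSg d k) := pvTwo_le_count d k j hkn hjn (by omega) hsg
    have hgk : pvGood d (d.getD k "") = false := by
      unfold pvGood; simp only [beq_eq_false_iff_ne, ne_eq]
      show ¬ (d.map pvSig).count (pvSg d k) = 1
      omega
    have hgj : pvGood d (d.getD j "") = false := by
      unfold pvGood; simp only [beq_eq_false_iff_ne, ne_eq]
      show ¬ (d.map pvSig).count (pvSg d j) = 1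
      rw [hsg]; omega
    rw [pvRip_filter d _ _ hgj, pvRip_filter d _ _ hgk]

-- filter by pvGood is untouched by every step
lemma pvFold_filter (d : List String) (ks : List Nat) (anan : List String) :
    (ks.foldl (pvStep d) anan).filter (pvGood d) = anan.filter (pvGood d) := by
  induction ks generalizing anan with
  | nil => rfl
  | cons k t ih =>
    rw [List.foldl_cons, ih, pvStep_filter]

lemma pvFold_subset (d : List String) (ks : List Nat) (anan : List String) :
    (ks.foldl (pvStep d) anan) ⊆ anan := by
  have hrip : ∀ v (l : List String), pvRip v l ⊆ l := by
    intro v l; unfold pvRip; split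
    · exact List.erase_subset
    · exact fun _ h => h
  induction ks generalizing anan with
  | nil => exact fun _ h => h
  | cons k t ih =>
    rw [List.foldl_cons]
    refine fun a ha => ?_
    have := ih (pvStep d anan k) ha
    unfold pvStep at this
    cases hf : pvFm d k with
    | none => rw [hf] at this; exact this
    | some j => rw [hf] at this; exact hrip _ _ (hrip _ _ this)

-- generic sum lemmas over index lists
-- counting a value of a list through its indices
-- the key combinatorial bound: the removal attempts targeting w cover every copy of w
set_option maxHeartbeats 1000000 in
lemma pvAtt_sum_ge (d : List String) (w : String) (hw : w ∈ d)
    (hs : 2 ≤ (d.map pvSig).count (pvSig w)) :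
    d.count w ≤ ((pvCand 0 d.length).map (pvAtt d w)).sum := by
  have hrw : ∀ i : Nat, (d.map pvSig).getD i (pvSig "") = pvSg d i := by
    intro i; rw [pvGetD_map]; rfl
  have hE : ∀ k : Nat, (if d.getD k "" == w then 1 else 0) = pvE d w k := by
    intro k; unfold pvE; simp [beq_iff_eq]
  have hcount : d.count w = ((pvCand 0 d.length).map (pvE d w)).sum := by
    rw [pvCount_eq_sum d w ""]
    exact congrArg List.sum (List.map_congr_left (fun k _ => hE k))
  by_cases hA : ∀ i, i < d.length → d.getD i "" = w → (pvFm d i).isSome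
  · -- every copy of w has a later partner: pvE ≤ pvAtt pointwise
    have hpt : ∀ k ∈ pvCand 0 d.length, pvE d w k ≤ pvAtt d w k := by
      intro k hk
      by_cases hP : d.getD k "" = w
      · have hks := hA k (by have := pvCand_mem.mp hk; omega) hP
        cases hf : pvFm d k with
        | none => rw [hf] at hks; simp at hks
        | some j => simp only [pvAtt, hf]; exact Nat.le_add_right _ _
      · unfold pvE; rw [if_neg hP]; exact Nat.zero_le _
    rw [hcount]
    exact List.sum_le_sum hpt
  · -- some copy of w (at i*) has no later partner; it is the last of its class
    push Not at hA
    obtain ⟨istar, hisn, hPstar, hnsome⟩ := hA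
    have hfmstar : pvFm d istar = none := Option.not_isSome_iff_eq_none.mp hnsome
    have hnone := pvFm_none d istar hfmstar
    have hsgstar : pvSg d istar = pvSig w := by unfold pvSg; rw [hPstar]
    -- the class has a second index, necessarily before i*
    have hex : ∃ t, t < d.length ∧ t ≠ istar ∧ pvSg d t = pvSig w := by
      by_contra hno
      push Not at hno
      have hle1 : (d.map pvSig).count (pvSig w) ≤ 1 := by
        rw [pvCount_eq_sum (d.map pvSig) (pvSig w) (pvSig "")]
        have hb : ∀ k ∈ pvCand 0 (d.map pvSig).length,
            (if (d.map pvSig).getD k (pvSig "") == pvSig w then 1 else 0)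
              ≤ (if k = istar then 1 else 0) := by
          intro k hk
          have hkn : k < d.length := by
            have := pvCand_mem.mp hk; simp only [List.length_map] at this; omega
          rw [hrw]
          by_cases hki : k = istar
          · simp [hki, hsgstar]
          · have := hno k hkn hki
            simp [beq_iff_eq, this]
        calc ((pvCand 0 (d.map pvSig).length).map
              (fun k => if (d.map pvSig).getD k (pvSig "") == pvSig w then 1 else 0)).sum
            ≤ ((pvCand 0 (d.map pvSig).length).map (fun k => if k = istar then 1 else 0)).sum :=
              List.sum_le_sum hb
          _ ≤ 1 := by rw [pvSum_indicator]; split <;> omega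
      omega
    obtain ⟨t, htn, htne, htsg⟩ := hex
    have htlt : t < istar := by
      rcases Nat.lt_trichotomy t istar with h | h | h
      · exact h
      · exact absurd h htne
      · exact absurd (htsg.trans hsgstar.symm) (hnone t h htn)
    -- the greatest class index below i*
    have hspec := Nat.findGreatest_spec (P := fun u => u < istar ∧ pvSg d u = pvSig w)
      (le_of_lt htlt) ⟨htlt, htsg⟩
    have hgreat : ∀ i, Nat.findGreatest (fun u => u < istar ∧ pvSg d u = pvSig w) istar < i →
        i ≤ istar → ¬ (i < istar ∧ pvSg d i = pvSig w) :=
      fun i h1 h2 => Nat.findGreatest_is_greatest h1 h2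
    set k0 := Nat.findGreatest (fun u => u < istar ∧ pvSg d u = pvSig w) istar with hk0def
    obtain ⟨hk0lt, hk0sg⟩ := hspec
    have hfmk0 : pvFm d k0 = some istar := by
      unfold pvFm
      apply pvCand_find?_intro
      · omega
      · omega
      · rw [hk0sg, hsgstar]; exact beq_self_eq_true _
      · intro i hi1 hi2
        have hni : ¬ (i < istar ∧ pvSg d i = pvSig w) := hgreat i (by omega) (by omega)
        have hne : pvSg d i ≠ pvSig w := fun he => hni ⟨by omega, he⟩
        rw [beq_eq_false_iff_ne, hk0sg]
        exact hne
    -- pointwise: pvE k + 1_(k0) ≤ pvAtt k + 1_(i*)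
    have hpt : ∀ k ∈ pvCand 0 d.length,
        pvE d w k + (if k = k0 then 1 else 0) ≤ pvAtt d w k + (if k = istar then 1 else 0) := by
      intro k hk
      have hkn : k < d.length := by have := pvCand_mem.mp hk; omega
      by_cases hkk0 : k = k0
      · have ha : pvAtt d w k = pvE d w k + pvE d w istar := by
          rw [hkk0]; simp only [pvAtt, hfmk0]
        have h1 : pvE d w istar = 1 := by unfold pvE; rw [if_pos hPstar]
        rw [ha, h1, if_pos hkk0, if_neg (show ¬ k = istar by omega)]
      · by_cases hki : k = istar
        · have h1 : pvE d w k ≤ 1 := by unfold pvE; split <;> omega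
          rw [if_neg hkk0, if_pos hki]
          omega
        · rw [if_neg hkk0, if_neg hki, Nat.add_zero, Nat.add_zero]
          by_cases hP : d.getD k "" = w
          · have hklt : k < istar := by
              rcases Nat.lt_trichotomy k istar with h | h | h
              · exact h
              · exact absurd h hki
              · have hsgk : pvSg d k = pvSig w := by unfold pvSg; rw [hP]
                exact absurd (hsgk.trans hsgstar.symm) (hnone k h hkn)
            cases hf : pvFm d k with
            | some j => simp only [pvAtt, hf]; exact Nat.le_add_right _ _
            | none =>
              exfalso
              have hch := pvCand_find?_none.mp hf istar (by omega) (by omega)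
              have hsgk : pvSg d k = pvSig w := by unfold pvSg; rw [hP]
              rw [beq_eq_false_iff_ne] at hch
              exact hch (hsgstar.trans hsgk.symm)
          · have h0 : pvE d w k = 0 := by unfold pvE; rw [if_neg hP]
            omega
    have hsums := List.sum_le_sum hpt
    rw [pvSum_map_add, pvSum_map_add, pvSum_indicator, pvSum_indicator] at hsums
    rw [hcount]
    have h1 : (0 ≤ k0 ∧ k0 < 0 + d.length) := by omega
    have h2 : (0 ≤ istar ∧ istar < 0 + d.length) := by omega
    rw [if_pos h1, if_pos h2] at hsums
    omega

-- A's pre-sort list is exactly the unique-signature filter of d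
lemma pvA_list (d : List String) :
    (pvCand 0 d.length).foldl (pvStep d) d = d.filter (pvGood d) := by
  have hgood : ∀ w ∈ (pvCand 0 d.length).foldl (pvStep d) d, pvGood d w = true := by
    intro w hwL
    by_contra hng
    have hwd : w ∈ d := pvFold_subset d (pvCand 0 d.length) d hwL
    have h1 : 0 < (d.map pvSig).count (pvSig w) :=
      List.count_pos_iff.mpr (List.mem_map_of_mem hwd)
    have h2 : (d.map pvSig).count (pvSig w) ≠ 1 := by
      unfold pvGood at hng; simpa using hng
    have hsum := pvAtt_sum_ge d w hwd (by omega)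
    have hcnt := pvFold_count d w (pvCand 0 d.length) d
    have hzero : ((pvCand 0 d.length).foldl (pvStep d) d).count w = 0 := by omega
    have : w ∉ (pvCand 0 d.length).foldl (pvStep d) d := by
      intro hmem
      have h3 : 0 < ((pvCand 0 d.length).foldl (pvStep d) d).count w :=
        List.count_pos_iff.mpr hmem
      omega
    exact this hwL
  calc (pvCand 0 d.length).foldl (pvStep d) d
      = ((pvCand 0 d.length).foldl (pvStep d) d).filter (pvGood d) :=
        (List.filter_eq_self.mpr hgood).symm
    _ = d.filter (pvGood d) := pvFold_filter d (pvCand 0 d.length) d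

-- B computes the same sorted filter
lemma pvB_eq (d : List String) :
    findAnanagrams_alt d = PySem.List.sorted (d.filter (pvGood d)) (fun w => w) false := by
  unfold findAnanagrams_alt
  refine congrArg (fun l => PySem.List.sorted l (fun w => w) false) ?_
  apply List.filter_congr
  intro w _
  have hfold : d.foldl
      (fun c w =>
        let s := PySem.List.sorted (PySem.Str.lower w).toList (fun ch => ch) false
        c.insert s (c.getD s 0 + 1))
      (PySem.Dict.empty : PySem.Dict (List Char) Int)
      = (d.map pvSig).foldl (fun c s => c.insert s (c.getD s 0 + 1)) PySem.Dict.empty :=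
    (List.foldl_map (f := pvSig)
      (g := fun (c : PySem.Dict (List Char) Int) s => c.insert s (c.getD s 0 + 1))
      (l := d) (init := PySem.Dict.empty)).symm
  rw [hfold, PySem.Dict.getD_foldl_insert_add_one, PySem.Dict.getD_empty]
  show ((0 + ((d.map pvSig).count (pvSig w) : Int)) == 1) = pvGood d w
  unfold pvGood
  rw [Bool.eq_iff_iff]
  simp

-- ===== VERDICT (by name: the statement is the Claim_ definition above) =====
theorem findAnanagrams_spec : Claim_equal_findAnanagrams := by
  intro d _
  unfold Spec_findAnanagrams
  rw [pvA_eq_fold, pvA_list, pvB_eq]
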